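-- pv_equiv track=rewrite | github.com/JonssonAlexander/NLP_Project_group45 | src/reports.py | top_tokens_by_label
-- ===== SOURCE A (Python) =====
-- from collections import Counter, defaultdict
-- from typing import Iterable, Mapping, Sequence
--
-- def top_tokens_by_label(
--     tokenised_dataset: Sequence[tuple[str, Sequence[str]]],
--     top_k: int = 20,
--     stopwords: set[str] | None = None,
-- ) -> Mapping[str, list[tuple[str, int]]]:
--     """
--     Return top-k frequent tokens per label, with optional stopword filtering.
--     """
--
--     counters: defaultdict[str, Counter[str]] = defaultdict(Counter)
--     for label, tokens in tokenised_dataset: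
--         for token in tokens:
--             if stopwords and token in stopwords:
--                 continue
--             counters[label][token] += 1
--
--     return {label: counter.most_common(top_k) for label, counter in counters.items()}
-- ===== SOURCE B (Python) =====
-- from collections import Counter
--
--
-- def top_tokens_by_label(tokenised_dataset, top_k=20, stopwords=None):
--     flat = Counter(
--         (label, token)
--         for label, tokens in tokenised_dataset
--         for token in tokens
--         if not (stopwords and token in stopwords)
--     )
--     buckets = {}
--     for (label, token), count in flat.items():
--         buckets.setdefault(label, []).append((token, count))
--     k = max(top_k, 0)
--     return {
--         label: sorted(bucket, key=lambda pair: pair[1], reverse=True)[:k]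
--         for label, bucket in buckets.items()
--     }
-- ===== Notes on version B (the rewrite author's own statement) =====
-- stated objective: alternative
-- what changed: B replaces A's defaultdict of per-label Counters with one flat Counter keyed by (label, token) pairs built in a single filtered pass, then a second pass that groups the flat counter's items into per-label buckets (first-occurrence order) and stable-sorts each bucket by count descending, matching most_common's tie-breaking.
import Mathlib
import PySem

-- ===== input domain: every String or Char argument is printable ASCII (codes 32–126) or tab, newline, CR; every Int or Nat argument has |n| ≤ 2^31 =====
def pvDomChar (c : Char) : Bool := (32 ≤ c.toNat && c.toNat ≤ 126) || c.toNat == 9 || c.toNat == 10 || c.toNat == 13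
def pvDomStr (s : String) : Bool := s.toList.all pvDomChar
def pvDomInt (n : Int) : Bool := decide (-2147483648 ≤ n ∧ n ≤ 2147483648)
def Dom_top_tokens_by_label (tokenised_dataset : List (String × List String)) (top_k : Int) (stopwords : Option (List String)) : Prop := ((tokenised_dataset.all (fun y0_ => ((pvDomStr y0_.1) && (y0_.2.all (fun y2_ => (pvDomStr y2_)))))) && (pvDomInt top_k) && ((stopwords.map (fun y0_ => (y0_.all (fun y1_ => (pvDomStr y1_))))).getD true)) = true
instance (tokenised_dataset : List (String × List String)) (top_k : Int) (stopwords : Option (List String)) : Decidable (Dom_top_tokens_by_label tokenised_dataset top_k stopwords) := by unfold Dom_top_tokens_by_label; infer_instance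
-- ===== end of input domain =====

-- B builds ONE flat Counter over (label, token) pairs and then groups its items per label,
-- instead of A's defaultdict of per-label Counters: alternative decomposition, same cost.

-- the stopword guard 'stopwords and token in stopwords' shared by both Pythons (empty set / None are falsy)
def pvStop (stopwords : Option (List String)) (token : String) : Bool :=
  match stopwords with
  | none => false
  | some sw => !sw.isEmpty && sw.contains token

-- ===== PORT A =====
-- Counter.most_common(n): the items stable-sorted by count descending, first max(n, 0) of them
def pvMostCommon (n : Int) (items : List (String × Int)) : List (String × Int) :=
  (PySem.List.sorted items (fun p => p.2) true).take (max n 0).toNat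

def top_tokens_by_label (tokenised_dataset : List (String × List String)) (top_k : Int) (stopwords : Option (List String)) : List (String × List (String × Int)) :=
  let counters : PySem.Dict String (PySem.Dict String Int) :=
    tokenised_dataset.foldl
      (fun cs e =>
        e.2.foldl
          (fun cs t =>
            if pvStop stopwords t then cs
            else cs.modify e.1 PySem.Dict.empty (fun c => c.modify t 0 (· + 1)))
          cs)
      PySem.Dict.empty
  counters.items.map (fun q => (q.1, pvMostCommon top_k q.2.items))

-- ===== PORT B =====
def top_tokens_by_label_alt (tokenised_dataset : List (String × List String)) (top_k : Int) (stopwords : Option (List String)) : List (String × List (String × Int)) :=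
  -- flat = Counter((label, token) for ... if not (stopwords and token in stopwords))
  let flat : PySem.Dict (String × String) Int :=
    PySem.Dict.counter
      (tokenised_dataset.flatMap
        (fun e => (e.2.filter (fun t => !pvStop stopwords t)).map (fun t => (e.1, t))))
  -- for (label, token), count in flat.items(): buckets.setdefault(label, []).append((token, count))
  let buckets : PySem.Dict String (List (String × Int)) :=
    (flat.items.map (fun p => (p.1.1, (p.1.2, p.2)))).foldl
      (fun b q => b.modify q.1 [] (fun xs => xs ++ [q.2])) PySem.Dict.empty
  -- sorted(bucket, key=..., reverse=True)[:k] with k = max(top_k, 0) ≥ 0 is 'take k'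
  let k : Nat := (max top_k 0).toNat
  buckets.items.map (fun q => (q.1, (PySem.List.sorted q.2 (fun p => p.2) true).take k))

-- ===== PRECONDITION & SPEC =====
def Spec_top_tokens_by_label (tokenised_dataset : List (String × List String)) (top_k : Int) (stopwords : Option (List String)) (out : List (String × List (String × Int))) : Prop := out = top_tokens_by_label_alt tokenised_dataset top_k stopwords
instance (tokenised_dataset : List (String × List String)) (top_k : Int) (stopwords : Option (List String)) (out : List (String × List (String × Int))) : Decidable (Spec_top_tokens_by_label tokenised_dataset top_k stopwords out) := by unfold Spec_top_tokens_by_label; infer_instance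

-- ===== CLAIM (what is proved, stated in full; the proofs are below) =====
def Claim_equal_top_tokens_by_label : Prop := ∀ (tokenised_dataset : List (String × List String)) (top_k : Int) (stopwords : Option (List String)), Dom_top_tokens_by_label tokenised_dataset top_k stopwords → Spec_top_tokens_by_label tokenised_dataset top_k stopwords (top_tokens_by_label tokenised_dataset top_k stopwords)

-- ===== LEMMAS AND PROOFS =====

theorem pv_foldl_flatMap {α β γ : Type} (l : List α) (f : α → List β) (g : γ → β → γ) (init : γ) :
    (l.flatMap f).foldl g init = l.foldl (fun acc x => (f x).foldl g acc) init := by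
  induction l generalizing init with
  | nil => rfl
  | cons x xs ih => simp [List.foldl_append, ih]

theorem pv_ofList_map_ofList {α β : Type} [BEq α] [LawfulBEq α] [BEq β] [LawfulBEq β]
    (xs : List α) (f : α → β) :
    PySem.Set.ofList ((PySem.Set.ofList xs).map f) = PySem.Set.ofList (xs.map f) := by
  induction xs using List.reverseRecOn with
  | nil => rfl
  | append_singleton xs x ih =>
    rw [PySem.Set.ofList_append_singleton, List.map_append, List.map_singleton,
      PySem.Set.ofList_append_singleton]
    by_cases hx : x ∈ xs
    · rw [PySem.Set.add_of_mem ((PySem.Set.mem_ofList xs x).2 hx), ih,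
        PySem.Set.add_of_mem ((PySem.Set.mem_ofList _ _).2 (List.mem_map_of_mem hx))]
    · rw [PySem.Set.add_of_not_mem (fun h => hx ((PySem.Set.mem_ofList xs x).1 h)),
        List.map_append, List.map_singleton, PySem.Set.ofList_append_singleton, ih]

theorem pv_filter_ofList {α : Type} [BEq α] [LawfulBEq α] (xs : List α) (q : α → Bool) :
    (PySem.Set.ofList xs).filter q = PySem.Set.ofList (xs.filter q) := by
  induction xs using List.reverseRecOn with
  | nil => rfl
  | append_singleton xs x ih =>
    rw [PySem.Set.ofList_append_singleton, List.filter_append]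
    by_cases hx : x ∈ xs
    · rw [PySem.Set.add_of_mem ((PySem.Set.mem_ofList xs x).2 hx), ih]
      by_cases hq : q x = true
      · rw [List.filter_singleton, hq, cond_true, PySem.Set.ofList_append_singleton,
          PySem.Set.add_of_mem ((PySem.Set.mem_ofList _ _).2 (List.mem_filter.2 ⟨hx, hq⟩))]
      · simp [hq]
    · rw [PySem.Set.add_of_not_mem (fun h => hx ((PySem.Set.mem_ofList xs x).1 h)),
        List.filter_append, ih]
      by_cases hq : q x = true
      · rw [List.filter_singleton, hq, cond_true, PySem.Set.ofList_append_singleton,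
          PySem.Set.add_of_not_mem (fun h => hx (List.mem_filter.1 ((PySem.Set.mem_ofList _ _).1 h)).1)]
      · simp [hq]

theorem pv_map_ofList_inj {α β : Type} [BEq α] [LawfulBEq α] [BEq β] [LawfulBEq β]
    (xs : List α) (f : α → β) (hinj : ∀ a ∈ xs, ∀ b ∈ xs, f a = f b → a = b) :
    (PySem.Set.ofList xs).map f = PySem.Set.ofList (xs.map f) := by
  induction xs using List.reverseRecOn with
  | nil => rfl
  | append_singleton xs x ih =>
    have hinj' : ∀ a ∈ xs, ∀ b ∈ xs, f a = f b → a = b := by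
      intro a ha b hb
      exact hinj a (List.mem_append_left _ ha) b (List.mem_append_left _ hb)
    rw [PySem.Set.ofList_append_singleton, List.map_append, List.map_singleton,
      PySem.Set.ofList_append_singleton]
    by_cases hx : x ∈ xs
    · rw [PySem.Set.add_of_mem ((PySem.Set.mem_ofList xs x).2 hx), ih hinj',
        PySem.Set.add_of_mem ((PySem.Set.mem_ofList _ _).2 (List.mem_map_of_mem hx))]
    · have hfx : f x ∉ xs.map f := by
        intro h
        rcases List.mem_map.1 h with ⟨a, ha, hfa⟩
        exact hx (hinj a (List.mem_append_left _ ha) x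
          (List.mem_append_right _ (List.mem_singleton_self x)) hfa ▸ ha)
      rw [PySem.Set.add_of_not_mem (fun h => hx ((PySem.Set.mem_ofList xs x).1 h)),
        List.map_append, List.map_singleton, ih hinj',
        PySem.Set.add_of_not_mem (fun h => hfx ((PySem.Set.mem_ofList _ _).1 h))]

theorem pv_getD_foldl_modify {κ ν β : Type} [BEq κ] [LawfulBEq κ] [DecidableEq κ]
    (L : List (κ × β)) (d0 : ν) (g : κ × β → ν → ν) (d : PySem.Dict κ ν) (l : κ) :
    (L.foldl (fun d p => d.modify p.1 d0 (g p)) d).getD l d0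
    = (L.filter (fun p => p.1 == l)).foldl (fun c p => g p c) (d.getD l d0) := by
  induction L generalizing d with
  | nil => rfl
  | cons p L ih =>
    rw [List.foldl_cons, ih, List.filter_cons]
    by_cases h : p.1 = l
    · simp [h]
    · simp [h, PySem.Dict.getD_modify, Ne.symm h]

theorem pv_count_snd_filter (ps : List (String × String)) (l t : String) :
    ((ps.filter (fun p => p.1 == l)).map (fun p => p.2)).count t = ps.count (l, t) := by
  rw [List.count, List.count, List.countP_map, List.countP_filter]
  apply List.countP_congr
  rintro ⟨a, b⟩ -
  by_cases ha : a = l <;> by_cases hb : b = t <;>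
    simp [ha, hb, Function.comp, Prod.ext_iff]

theorem pvA_items (ps : List (String × String)) :
    (ps.foldl (fun cs p => cs.modify p.1 PySem.Dict.empty (fun c => c.modify p.2 0 (· + 1)))
        (PySem.Dict.empty : PySem.Dict String (PySem.Dict String Int))).items
    = (PySem.Set.ofList (ps.map (fun p => p.1))).map
        (fun l => (l, PySem.Dict.counter ((ps.filter (fun p => p.1 == l)).map (fun p => p.2)))) := by
  set N := ps.foldl (fun cs p => cs.modify p.1 PySem.Dict.empty (fun c => c.modify p.2 0 (· + 1)))
      (PySem.Dict.empty : PySem.Dict String (PySem.Dict String Int)) with hN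
  have hkeys : N.keys = PySem.Set.ofList (ps.map (fun p => p.1)) := by
    rw [hN]
    have h := PySem.Dict.keys_foldl_modify_key ps (fun p => p.1) PySem.Dict.empty
      (fun _ p => (fun c => c.modify p.2 0 (· + 1)))
      (PySem.Dict.empty : PySem.Dict String (PySem.Dict String Int))
    simpa [PySem.Dict.keys_empty, PySem.Set.update_nil_left] using h
  have hnd : N.keys.Nodup := by
    rw [hkeys]; exact PySem.Set.nodup_ofList _
  have hget : ∀ l, N.getD l PySem.Dict.empty
      = PySem.Dict.counter ((ps.filter (fun p => p.1 == l)).map (fun p => p.2)) := by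
    intro l
    rw [hN, pv_getD_foldl_modify, PySem.Dict.getD_empty, PySem.Dict.counter_eq_foldl,
      List.foldl_map]
  rw [PySem.Dict.items_eq_map_keys N hnd PySem.Dict.empty, hkeys]
  simp only [hget]

theorem pvB_items (ps : List (String × String)) :
    ((((PySem.Dict.counter ps).items.map (fun p => (p.1.1, (p.1.2, p.2)))).foldl
        (fun b q => b.modify q.1 [] (fun xs => xs ++ [q.2])) PySem.Dict.empty)).items
    = (PySem.Set.ofList (ps.map (fun p => p.1))).map
        (fun l => (l, (PySem.Dict.counter ((ps.filter (fun p => p.1 == l)).map (fun p => p.2))).items)) := by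
  have hL : (PySem.Dict.counter ps).items.map (fun p => (p.1.1, (p.1.2, p.2)))
      = (PySem.Set.ofList ps).map (fun x => (x.1, (x.2, (ps.count x : Int)))) := by
    rw [PySem.Dict.items_counter, List.map_map]
    rfl
  set B := (((PySem.Dict.counter ps).items.map (fun p => (p.1.1, (p.1.2, p.2)))).foldl
      (fun b q => b.modify q.1 [] (fun xs => xs ++ [q.2])) PySem.Dict.empty) with hB
  have hkeys : B.keys = PySem.Set.ofList (ps.map (fun p => p.1)) := by
    rw [hB]
    have h := PySem.Dict.keys_foldl_modify_key
      ((PySem.Dict.counter ps).items.map (fun p => (p.1.1, (p.1.2, p.2))))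
      (fun q => q.1) [] (fun _ q => (fun xs => xs ++ [q.2])) PySem.Dict.empty
    rw [h, PySem.Dict.keys_empty, PySem.Set.update_nil_left, hL, List.map_map]
    have hc : ((fun q : String × (String × Int) => q.1) ∘ fun x : String × String => (x.1, (x.2, (ps.count x : Int))))
        = fun x : String × String => x.1 := rfl
    rw [hc, pv_ofList_map_ofList]
  have hnd : B.keys.Nodup := by
    rw [hkeys]; exact PySem.Set.nodup_ofList _
  have hget : ∀ l, B.getD l []
      = (PySem.Dict.counter ((ps.filter (fun p => p.1 == l)).map (fun p => p.2))).items := by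
    intro l
    rw [hB, PySem.Dict.getD_foldl_modify_append, PySem.Dict.getD_empty, List.nil_append, hL,
      List.filter_map, List.map_map]
    have hcomp : ((fun q : String × (String × Int) => q.1 == l) ∘ fun x : String × String => (x.1, (x.2, (ps.count x : Int))))
        = fun x : String × String => x.1 == l := rfl
    rw [hcomp]
    have hmc : ((PySem.Set.ofList ps).filter (fun x => x.1 == l)).map
          ((fun q : String × (String × Int) => q.2) ∘ fun x : String × String => (x.1, (x.2, (ps.count x : Int))))
        = ((PySem.Set.ofList ps).filter (fun x => x.1 == l)).map
          ((fun t => (t, (ps.count (l, t) : Int))) ∘ (fun x : String × String => x.2)) := by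
      apply List.map_congr_left
      intro x hx
      have hxl : x.1 = l := by
        have := (List.mem_filter.1 hx).2
        exact beq_iff_eq.1 this
      simp [Function.comp, ← hxl]
    rw [hmc, ← List.map_map, pv_filter_ofList, pv_map_ofList_inj _ _ (by
        rintro ⟨a1, a2⟩ ha ⟨b1, b2⟩ hb h
        have ha1 : a1 = l := beq_iff_eq.1 (List.mem_filter.1 ha).2
        have hb1 : b1 = l := beq_iff_eq.1 (List.mem_filter.1 hb).2
        simp only at h
        rw [Prod.ext_iff]
        exact ⟨ha1.trans hb1.symm, h⟩),
      PySem.Dict.items_counter]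
    apply List.map_congr_left
    intro t _
    simp [pv_count_snd_filter]
  rw [PySem.Dict.items_eq_map_keys B hnd [], hkeys]
  simp only [hget]

-- ===== VERDICT (by name: the statement is the Claim_ definition above) =====
theorem top_tokens_by_label_spec : Claim_equal_top_tokens_by_label := by
  intro tokenised_dataset top_k stopwords _
  unfold Spec_top_tokens_by_label top_tokens_by_label top_tokens_by_label_alt
  have hstep : ∀ (cs : PySem.Dict String (PySem.Dict String Int)) (e : String × List String),
      e.2.foldl (fun cs t => if pvStop stopwords t then cs
          else cs.modify e.1 PySem.Dict.empty (fun c => c.modify t 0 (· + 1))) cs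
      = ((e.2.filter (fun t => !pvStop stopwords t)).map (fun t => (e.1, t))).foldl
          (fun cs p => cs.modify p.1 PySem.Dict.empty (fun c => c.modify p.2 0 (· + 1))) cs := by
    intro cs e
    rw [List.foldl_map, List.foldl_filter]
    have hfun : (fun (cs : PySem.Dict String (PySem.Dict String Int)) t => if pvStop stopwords t then cs
          else cs.modify e.1 PySem.Dict.empty (fun c => c.modify t 0 (· + 1)))
        = (fun (cs : PySem.Dict String (PySem.Dict String Int)) t => if (!pvStop stopwords t) = true
          then cs.modify e.1 PySem.Dict.empty (fun c => c.modify t 0 (· + 1)) else cs) := by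
      funext cs' t
      cases h : pvStop stopwords t <;> simp [h]
    rw [hfun]
  simp only [hstep]
  rw [← pv_foldl_flatMap tokenised_dataset
      (fun e => (e.2.filter (fun t => !pvStop stopwords t)).map (fun t => (e.1, t)))
      (fun (cs : PySem.Dict String (PySem.Dict String Int)) (p : String × String) =>
        cs.modify p.1 PySem.Dict.empty (fun c => c.modify p.2 0 (· + 1)))
      (PySem.Dict.empty : PySem.Dict String (PySem.Dict String Int))]
  rw [pvA_items, pvB_items]
  simp only [List.map_map]
  apply List.map_congr_left
  intro l _
  simp only [Function.comp_apply, pvMostCommon]
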